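-- pv_equiv track=rewrite | github.com/microsoft/EMNLP2019-Split-And-Recombine | model/follow_up.py | predict_span_start_end
-- ===== SOURCE A (Python) =====
-- def predict_span_start_end(prev_labels,
--                            fol_labels):
--     # previous phrase list & follow-up phrase list
--     prev_start_end = []
--     fol_start_end = []
--     start = 0
--
--     # cut into span start/end representation
--     for pos_ind in range(len(prev_labels) + 1):
--         # pos of SPLIT
--         if pos_ind == len(prev_labels):
--             if (start, pos_ind) not in prev_start_end:
--                 prev_start_end.append((start, pos_ind))
--             break
--         elif prev_labels[pos_ind] != 0 and pos_ind != start: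
--             prev_start_end.append((start, pos_ind))
--             start = pos_ind
--
--     start = 0
--     # cut into span start/end representation
--     for pos_ind in range(len(fol_labels) + 1):
--         # pos of SPLIT
--         if pos_ind == len(fol_labels):
--             if (start, pos_ind) not in fol_start_end:
--                 fol_start_end.append((start, pos_ind))
--             break
--         elif fol_labels[pos_ind] != 0 and pos_ind != start:
--             fol_start_end.append((start, pos_ind))
--             start = pos_ind
--
--     return prev_start_end, fol_start_end
-- ===== SOURCE B (Python) =====
-- def predict_span_start_end(prev_labels, fol_labels):
--     # Run-length encode the label sequence (a new run starts at each nonzero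
--     # label except at position 0), then rebuild span (start, end) pairs from
--     # the run lengths by prefix summation.
--     def spans(labels):
--         runs = []
--         for x in labels:
--             if not runs:
--                 runs.append(1)
--             elif x != 0:
--                 runs.append(1)
--             else:
--                 runs[-1] += 1
--         spans_list, end = [], 0
--         for r in (runs or [0]):
--             spans_list.append((end, end + r))
--             end += r
--         return spans_list
--     return spans(prev_labels), spans(fol_labels)
-- ===== Notes on version B (the rewrite author's own statement) =====
-- stated objective: alternative
-- what changed: Replaces A's boundary-index scan with a running start cursor by run-length encoding the labels (a new run at each nonzero label except position 0) and then reconstructing the (start, end) span pairs from the run lengths by prefix summation.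
import Mathlib
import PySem

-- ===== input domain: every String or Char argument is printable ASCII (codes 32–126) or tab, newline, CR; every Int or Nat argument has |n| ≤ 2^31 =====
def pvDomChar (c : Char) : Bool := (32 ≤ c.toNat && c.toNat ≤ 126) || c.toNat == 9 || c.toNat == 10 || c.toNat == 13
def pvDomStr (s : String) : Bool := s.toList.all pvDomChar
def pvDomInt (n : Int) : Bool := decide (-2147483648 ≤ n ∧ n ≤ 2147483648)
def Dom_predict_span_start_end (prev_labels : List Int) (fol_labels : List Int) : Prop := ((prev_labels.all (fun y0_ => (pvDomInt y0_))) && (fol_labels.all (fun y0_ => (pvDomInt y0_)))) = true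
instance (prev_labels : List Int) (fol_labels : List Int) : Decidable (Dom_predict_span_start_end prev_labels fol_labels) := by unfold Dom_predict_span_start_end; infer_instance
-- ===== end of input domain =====

-- B: run-length encodes the labels and rebuilds span pairs from the run lengths by
-- prefix summation, instead of A's boundary scan with a running start cursor; same O(n) cost.

-- ===== PORT A =====
-- the for-loop over range(len(labels)+1) with state (start, acc) and the terminal break
def pvAGo (labels : List Int) : List Int → Int → List (Int × Int) → List (Int × Int)
  | [], _, acc => acc
  | pos :: rest, start, acc =>
    if pos = (labels.length : Int) then
      -- `if (start, pos_ind) not in …: append`, then `break`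
      (if (start, pos) ∈ acc then acc else acc ++ [(start, pos)])
    else if (PySem.List.pyGetD labels pos 0) ≠ 0 ∧ pos ≠ start then
      pvAGo labels rest pos (acc ++ [(start, pos)])
    else
      pvAGo labels rest start acc

def pvASpans (labels : List Int) : List (Int × Int) :=
  pvAGo labels (PySem.List.pyRange 0 ((labels.length : Int) + 1) 1) 0 []

def predict_span_start_end (prev_labels : List Int) (fol_labels : List Int) : (List (Int × Int)) × (List (Int × Int)) :=
  (pvASpans prev_labels, pvASpans fol_labels)

-- ===== PORT B =====
-- run-length encoding pass: `runs` list, new run at each nonzero label except the first position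
def pvBRuns (labels : List Int) : List Int :=
  labels.foldl
    (fun runs x =>
      if runs = [] then runs ++ [1]
      else if x ≠ 0 then runs ++ [1]
      else runs.dropLast ++ [runs.getLast?.getD 0 + 1])
    []

-- prefix-sum pass: `for r in (runs or [0]): spans_list.append((end, end + r)); end += r`
def pvBSpans (labels : List Int) : List (Int × Int) :=
  ((if pvBRuns labels = [] then [(0 : Int)] else pvBRuns labels).foldl
      (fun st r => (st.1 ++ [(st.2, st.2 + r)], st.2 + r))
      (([] : List (Int × Int)), (0 : Int))).1

def predict_span_start_end_alt (prev_labels : List Int) (fol_labels : List Int) : (List (Int × Int)) × (List (Int × Int)) :=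
  (pvBSpans prev_labels, pvBSpans fol_labels)

-- ===== PRECONDITION & SPEC =====
def Spec_predict_span_start_end (prev_labels : List Int) (fol_labels : List Int) (out : (List (Int × Int)) × (List (Int × Int))) : Prop := out = predict_span_start_end_alt prev_labels fol_labels
instance (prev_labels : List Int) (fol_labels : List Int) (out : (List (Int × Int)) × (List (Int × Int))) : Decidable (Spec_predict_span_start_end prev_labels fol_labels out) := by unfold Spec_predict_span_start_end; infer_instance

-- ===== CLAIM (what is proved, stated in full; the proofs are below) =====
def Claim_equal_predict_span_start_end : Prop := ∀ (prev_labels : List Int) (fol_labels : List Int), Dom_predict_span_start_end prev_labels fol_labels → Spec_predict_span_start_end prev_labels fol_labels (predict_span_start_end prev_labels fol_labels)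

-- ===== LEMMAS AND PROOFS =====

-- common reference: spans of the suffix `rest` given current span start s and cursor c,
-- with s < c so A's `pos != start` guard is always true.
def pvRef (s c : Int) : List Int → List (Int × Int)
  | [] => [(s, c)]
  | x :: rest => if x ≠ 0 then (s, c) :: pvRef c (c + 1) rest else pvRef s (c + 1) rest

theorem pvAGo_eq (labels : List Int) (k : Nat) (s : Int) (acc : List (Int × Int))
    (hk1 : 1 ≤ k) (hkn : k ≤ labels.length) (hs : s < (k : Int))
    (hacc : ∀ p ∈ acc, p.2 < (k : Int)) :
    pvAGo labels (PySem.List.pyRange (k : Int) ((labels.length : Int) + 1) 1) s acc =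
      acc ++ pvRef s (k : Int) (labels.drop k) := by
  induction hn : labels.length - k generalizing k s acc with
  | zero =>
    have hkn' : labels.length = k := by omega
    rw [hkn']
    rw [PySem.List.pyRange_one_cons (by exact_mod_cast Nat.lt_succ_self _),
        PySem.List.pyRange_one_eq_nil (le_refl _)]
    rw [pvAGo, hkn', if_pos rfl]
    have hnotmem : ((s, (k : Int)) ∉ acc) := by
      intro hmem
      have := hacc _ hmem
      simp at this
    rw [if_neg hnotmem]
    rw [show labels.drop k = [] from List.drop_eq_nil_of_le (by omega)]
    rfl
  | succ m ih =>
    have hkn2 : k < labels.length := by omega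
    have hklt : (k : Int) < (labels.length : Int) + 1 := by exact_mod_cast Nat.lt_succ_of_lt hkn2
    rw [PySem.List.pyRange_one_cons hklt]
    rw [pvAGo]
    have hne : (k : Int) ≠ (labels.length : Int) := by exact_mod_cast Nat.ne_of_lt hkn2
    rw [if_neg hne]
    have hget : PySem.List.pyGetD labels (k : Int) 0 = labels[k] := by
      rw [PySem.List.pyGetD_natCast]
      simp [hkn2]
    have hdrop : labels.drop k = labels[k] :: labels.drop (k + 1) :=
      (List.getElem_cons_drop hkn2).symm
    have hcast : ((k : Int) + 1) = ((k + 1 : Nat) : Int) := by push_cast; ring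
    by_cases hval : labels[k] ≠ 0
    · rw [if_pos ⟨by rw [hget]; exact hval, by omega⟩]
      rw [hcast, ih (k + 1) (k : Int) (acc ++ [(s, (k : Int))]) (by omega) (by omega)
            (by push_cast; omega)
            (by intro p hp
                rcases List.mem_append.mp hp with h | h
                · have := hacc _ h; push_cast; omega
                · simp at h; subst h; push_cast; omega)
            (by omega)]
      rw [hdrop, pvRef, if_pos hval]
      push_cast
      simp
    · rw [if_neg (by rw [hget]; tauto)]
      rw [hcast, ih (k + 1) s acc (by omega) (by omega)
            (by push_cast; omega)
            (by intro p hp; have := hacc _ hp; push_cast; omega)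
            (by omega)]
      rw [hdrop, pvRef, if_neg hval]
      push_cast
      rfl

-- B's run-length step on a nonempty runs list, as a named recursion
def pvRunsGo : List Int → List Int → List Int
  | runs, [] => runs
  | runs, x :: rest =>
    if x ≠ 0 then pvRunsGo (runs ++ [1]) rest
    else pvRunsGo (runs.dropLast ++ [runs.getLast?.getD 0 + 1]) rest

theorem pvBRuns_foldl_eq (rest : List Int) (R : List Int) (hR : R ≠ []) :
    rest.foldl
      (fun runs x =>
        if runs = [] then runs ++ [1]
        else if x ≠ 0 then runs ++ [1]
        else runs.dropLast ++ [runs.getLast?.getD 0 + 1]) R = pvRunsGo R rest := by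
  induction rest generalizing R with
  | nil => rfl
  | cons x rest ih =>
    simp only [List.foldl_cons, pvRunsGo, if_neg hR]
    split_ifs with hx <;> exact ih _ (by simp)

theorem pvRunsGo_ne_nil (rest R : List Int) (hR : R ≠ []) : pvRunsGo R rest ≠ [] := by
  induction rest generalizing R with
  | nil => exact hR
  | cons x rest ih =>
    rw [pvRunsGo]
    split_ifs <;> exact ih _ (by simp)

-- pairs from run lengths by prefix summation, starting at position e
def pvPairs (e : Int) : List Int → List (Int × Int)
  | [] => []
  | r :: rs => (e, e + r) :: pvPairs (e + r) rs

theorem pvPairs_append (A B : List Int) (e : Int) :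
    pvPairs e (A ++ B) = pvPairs e A ++ pvPairs (e + A.sum) B := by
  induction A generalizing e with
  | nil => simp [pvPairs]
  | cons a A ih => simp [pvPairs, ih, add_assoc]

theorem pvSpanFold (runs : List Int) (acc : List (Int × Int)) (e : Int) :
    (runs.foldl (fun st r => (st.1 ++ [(st.2, st.2 + r)], st.2 + r)) (acc, e)).1 =
      acc ++ pvPairs e runs := by
  induction runs generalizing acc e with
  | nil => simp [pvPairs]
  | cons r rs ih => simp [pvPairs, ih]

theorem pvRunsGo_pairs (rest : List Int) (R : List Int) (r : Int) :
    pvPairs 0 (pvRunsGo (R ++ [r]) rest) =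
      pvPairs 0 R ++ pvRef R.sum (R.sum + r) rest := by
  induction rest generalizing R r with
  | nil => rw [pvRunsGo, pvPairs_append]; simp [pvPairs, pvRef]
  | cons x rest ih =>
    rw [pvRunsGo, pvRef]
    split_ifs with hx
    · rw [show (R ++ [r]) ++ [1] = (R ++ [r]) ++ [(1 : Int)] from rfl, ih (R ++ [r]) 1]
      rw [pvPairs_append]
      simp [pvPairs, add_assoc]
    · rw [List.dropLast_concat, List.getLast?_concat]
      rw [show (Option.some r).getD 0 + 1 = r + 1 from rfl, ih R (r + 1)]
      simp [add_assoc]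

theorem pvSpans_eq (labels : List Int) : pvASpans labels = pvBSpans labels := by
  cases labels with
  | nil => decide
  | cons y rest =>
    -- A side reduces to pvRef 0 1 rest
    unfold pvASpans
    have hpos : 0 < (y :: rest).length := by simp
    rw [PySem.List.pyRange_one_cons (by exact_mod_cast Nat.succ_pos _)]
    rw [pvAGo]
    rw [if_neg (by exact_mod_cast (Nat.ne_of_lt hpos)), if_neg (by simp)]
    have hA := pvAGo_eq (y :: rest) 1 0 [] (le_refl _) hpos (by norm_num) (by simp)
    simp only [Nat.cast_one] at hA
    rw [show (0 : Int) + 1 = (1 : Int) by ring, hA]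
    -- B side reduces to pvPairs 0 (pvRunsGo [1] rest)
    unfold pvBSpans pvBRuns
    rw [List.foldl_cons]
    rw [show (if ([] : List Int) = [] then ([] : List Int) ++ [1]
          else if y ≠ 0 then ([] : List Int) ++ [1]
          else ([] : List Int).dropLast ++ [([] : List Int).getLast?.getD 0 + 1]) = [1] from rfl]
    rw [pvBRuns_foldl_eq rest [1] (by simp)]
    rw [if_neg (pvRunsGo_ne_nil rest [1] (by simp))]
    rw [pvSpanFold]
    rw [show ([1] : List Int) = [] ++ [(1 : Int)] from rfl, pvRunsGo_pairs]
    simp [pvPairs]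

-- ===== VERDICT (by name: the statement is the Claim_ definition above) =====
theorem predict_span_start_end_spec : Claim_equal_predict_span_start_end := by
  intro p f _
  unfold Spec_predict_span_start_end predict_span_start_end predict_span_start_end_alt
  rw [pvSpans_eq, pvSpans_eq]
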